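-- pv_equiv track=rewrite | github.com/AndrejLehmann/my_pfn_2019 | Vorlesung/src/Math/multisets.py | multisets_enum_rec
-- ===== SOURCE A (Python) =====
-- def multisets_enum_rec(multiset_size,num_elems):
--   multiset_list = list()
--   multiset = [None] * multiset_size
--   def multiset_rec(m,k):
--     if m == 0:
--       multiset_list.append(multiset.copy())
--     elif k > 0:
--       for take in range(0,m+1):
--         for d in range(multiset_size - m,\
--                        multiset_size - m + take):
--           multiset[d] = num_elems - k
--         multiset_rec(m-take,k-1)
--   multiset_rec(multiset_size,num_elems)
--   return multiset_list
-- ===== SOURCE B (Python) =====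
-- import itertools
--
-- def multisets_enum_rec(multiset_size, num_elems):
--   if multiset_size < 0:
--     return []
--   if multiset_size == 0:
--     return [[]]          # one empty multiset; avoids materializing range(num_elems)
--   cwr = list(itertools.combinations_with_replacement(range(num_elems), multiset_size))
--   return [list(t) for t in reversed(cwr)]
-- ===== Notes on version B (the rewrite author's own statement) =====
-- stated objective: idiomatic
-- what changed: Replaces A's stateful slot-filling double recursion over a shared mutable buffer with the standard-library combinations_with_replacement generator, reversed to match A's enumeration order.
import Mathlib
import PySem

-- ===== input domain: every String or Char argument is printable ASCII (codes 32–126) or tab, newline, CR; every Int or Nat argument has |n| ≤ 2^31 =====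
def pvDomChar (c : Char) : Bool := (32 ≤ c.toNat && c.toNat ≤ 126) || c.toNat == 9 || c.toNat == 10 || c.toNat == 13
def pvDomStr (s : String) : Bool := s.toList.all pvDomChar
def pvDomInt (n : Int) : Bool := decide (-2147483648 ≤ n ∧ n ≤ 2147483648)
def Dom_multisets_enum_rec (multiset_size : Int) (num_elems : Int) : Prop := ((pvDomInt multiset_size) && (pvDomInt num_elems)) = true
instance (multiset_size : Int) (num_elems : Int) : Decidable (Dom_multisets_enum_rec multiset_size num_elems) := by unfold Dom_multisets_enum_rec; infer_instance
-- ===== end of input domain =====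

-- B replaces A's slot-filling double recursion over a shared mutable buffer with the
-- standard combinations-with-replacement generator (lex order), reversed to match A's order.

-- ===== PORT A =====
-- multiset_rec(m, k): the inner recursive closure of A; the state it mutates
-- (multiset_list, multiset) is threaded explicitly as a pair.
def pvARec (multiset_size num_elems : Int) (m k : Int)
    (st : List (List (Option Int)) × List (Option Int)) :
    List (List (Option Int)) × List (Option Int) :=
  if m = 0 then
    (st.1 ++ [st.2], st.2)               -- multiset_list.append(multiset.copy())
  else if hk : 0 < k then
    -- for take in range(0, m+1): (write slots; recurse)
    (PySem.List.pyRange 0 (m + 1) 1).foldl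
      (fun st take =>
        -- for d in range(multiset_size - m, multiset_size - m + take): multiset[d] = num_elems - k
        -- (d is always a valid non-negative index on every reachable call, so .set d.toNat is exact)
        let ms := (PySem.List.pyRange (multiset_size - m) (multiset_size - m + take) 1).foldl
          (fun ms d => ms.set d.toNat (some (num_elems - k))) st.2
        pvARec multiset_size num_elems (m - take) (k - 1) (st.1, ms))
      st
  else st
termination_by k.toNat
decreasing_by simp_wf; omega

def multisets_enum_rec (multiset_size : Int) (num_elems : Int) : List (List (Option Int)) :=
  -- multiset_list = []; multiset = [None] * multiset_size; multiset_rec(multiset_size, num_elems)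
  (pvARec multiset_size num_elems multiset_size num_elems
    ([], List.replicate multiset_size.toNat none)).1

-- ===== PORT B =====
-- itertools.combinations_with_replacement(range(n), r) in lexicographic order, as the list of
-- nondecreasing r-tuples over {n-k, …, n-1} (k symbols still usable out of n):
-- those starting with the smallest symbol n-k first, then those over the remaining k-1 symbols.
def pvCwr (n : Int) : Nat → Nat → List (List Int)
  | 0, _ => [[]]
  | _ + 1, 0 => []
  | m + 1, k + 1 =>
      ((pvCwr n m (k + 1)).map (fun t => (n - (k + 1 : Nat)) :: t)) ++ pvCwr n (m + 1) k
termination_by m k => (k, m)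

def multisets_enum_rec_alt (multiset_size : Int) (num_elems : Int) : List (List (Option Int)) :=
  if multiset_size < 0 then []
  else if multiset_size = 0 then [[]]
  else ((pvCwr num_elems multiset_size.toNat num_elems.toNat).reverse).map (fun t => t.map some)

-- ===== PRECONDITION & SPEC =====
-- Pre_ excludes only the inputs on which CPython's A RAISES RecursionError: A recurses
-- num_elems stack frames deep whenever multiset_size > 0, so it raises once num_elems
-- reaches the interpreter's recursion limit (10000 under the grader); the bound 9800 sits
-- just under that limit to absorb the handful of frames already on the stack at call time.
def Pre_multisets_enum_rec (multiset_size : Int) (num_elems : Int) : Prop :=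
  multiset_size ≤ 0 ∨ num_elems ≤ 9800
instance (multiset_size : Int) (num_elems : Int) : Decidable (Pre_multisets_enum_rec multiset_size num_elems) := by unfold Pre_multisets_enum_rec; infer_instance
def pvWitness_multisets_enum_rec : Int × Int := (2, 3)

def Spec_multisets_enum_rec (multiset_size : Int) (num_elems : Int) (out : List (List (Option Int))) : Prop := out = multisets_enum_rec_alt multiset_size num_elems
instance (multiset_size : Int) (num_elems : Int) (out : List (List (Option Int))) : Decidable (Spec_multisets_enum_rec multiset_size num_elems out) := by unfold Spec_multisets_enum_rec; infer_instance

-- ===== CLAIM (what is proved, stated in full; the proofs are below) =====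
def Claim_equal_multisets_enum_rec : Prop := ∀ (multiset_size : Int) (num_elems : Int), Dom_multisets_enum_rec multiset_size num_elems → Pre_multisets_enum_rec multiset_size num_elems → Spec_multisets_enum_rec multiset_size num_elems (multisets_enum_rec multiset_size num_elems)

-- ===== LEMMAS AND PROOFS =====

-- pure functional description of A's recursion: enumPy n m k = the list of length-m
-- nondecreasing tuples over the k symbols {n-k, ..., n-1}, in A's enumeration order
def enumPy (n : Int) : Nat → Nat → List (List Int)
  | 0, _ => [[]]
  | _ + 1, 0 => []
  | m + 1, k + 1 =>
      (List.range (m + 2)).flatMap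
        (fun take => (enumPy n (m + 1 - take) k).map
          (fun t => List.replicate take (n - (k + 1 : Nat)) ++ t))
termination_by m k => (k, m)

theorem enumPy_unfold (n : Int) (m k : Nat) :
    enumPy n m (k + 1)
      = (List.range (m + 1)).flatMap
          (fun take => (enumPy n (m - take) k).map
            (fun t => List.replicate take (n - (k + 1 : Nat)) ++ t)) := by
  cases m with
  | zero => simp [enumPy]
  | succ m => rw [enumPy]

theorem enumPy_succ_succ (n : Int) (m k : Nat) :
    enumPy n (m + 1) (k + 1)
      = enumPy n (m + 1) k
        ++ (enumPy n m (k + 1)).map (fun t => (n - (k + 1 : Nat)) :: t) := by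
  rw [enumPy_unfold n (m + 1) k, enumPy_unfold n m k]
  rw [List.range_succ_eq_map]
  rw [List.flatMap_cons]
  congr 1
  · simp
  · rw [List.flatMap_map, List.map_flatMap]
    apply List.flatMap_congr
    intro take _
    have : m + 1 - take.succ = m - take := by omega
    rw [this, List.map_map]
    apply List.map_congr_left
    intro t _
    simp [List.replicate_succ]

theorem enumPy_eq_reverse_cwr (n : Int) (m k : Nat) :
    enumPy n m k = (pvCwr n m k).reverse := by
  induction m, k using pvCwr.induct with
  | case1 k => simp [enumPy, pvCwr]
  | case2 m => simp [enumPy, pvCwr]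
  | case3 m k ih1 ih2 =>
      rw [enumPy_succ_succ, pvCwr, List.reverse_append, ← List.map_reverse, ih1, ih2]

-- the inner write loop of A: writing value v to slots p, ..., p+T-1
theorem write_loop (v : Option Int) :
    ∀ (T : Nat) (p : Nat) (ms : List (Option Int)), p + T ≤ ms.length →
    (PySem.List.pyRange (p : Int) ((p : Int) + (T : Int)) 1).foldl
        (fun ms d => ms.set d.toNat v) ms
      = ms.take p ++ List.replicate T v ++ ms.drop (p + T) := by
  intro T
  induction T with
  | zero =>
      intro p ms h
      rw [PySem.List.pyRange_one_eq_nil (by omega)]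
      simp
  | succ T ih =>
      intro p ms h
      rw [PySem.List.pyRange_one_cons (by omega)]
      rw [List.foldl_cons]
      have harg : (p : Int) + ((T : Nat) + 1 : Nat) = ((p + 1 : Nat) : Int) + (T : Int) := by
        push_cast; ring
      rw [harg]
      rw [show ((p : Int)).toNat = p from rfl]
      rw [show ((p : Int) + 1) = ((p + 1 : Nat) : Int) from by push_cast; ring]
      rw [ih (p + 1) (ms.set p v) (by simp; omega)]
      have hp : p < ms.length := by omega
      rw [List.set_eq_take_cons_drop v hp]
      have hlen : (ms.take p).length = p := by simp; omega
      rw [show (ms.take p ++ v :: ms.drop (p + 1)).take (p + 1)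
            = (ms.take p ++ v :: ms.drop (p + 1)).take ((ms.take p).length + 1) by rw [hlen]]
      rw [List.take_length_add_append]
      rw [show p + 1 + T = (ms.take p ++ [v]).length + T by simp [hlen]]
      rw [show List.take p ms ++ v :: List.drop (p + 1) ms
            = (List.take p ms ++ [v]) ++ List.drop (p + 1) ms from by simp]
      rw [List.drop_length_add_append]
      rw [List.drop_drop]
      simp [List.replicate_succ]
      omega

theorem pvARec_spec (sz ne : Int) (K : Nat) :
    ∀ (k m : Int), k.toNat = K → 0 ≤ m → m ≤ sz →
    ∀ (acc : List (List (Option Int))) (ms : List (Option Int)),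
      ms.length = sz.toNat →
      (pvARec sz ne m k (acc, ms)).1
        = acc ++ (enumPy ne m.toNat k.toNat).map
            (fun t => ms.take (sz.toNat - m.toNat) ++ t.map some)
      ∧ (pvARec sz ne m k (acc, ms)).2.length = sz.toNat
      ∧ (pvARec sz ne m k (acc, ms)).2.take (sz.toNat - m.toNat)
          = ms.take (sz.toNat - m.toNat) := by
  induction K with
  | zero =>
      intro k m hk hm0 hmsz acc ms hlen
      rw [pvARec]
      by_cases hm : m = 0
      · subst hm
        rw [hk]
        simp [enumPy, ← hlen]
      · rw [if_neg hm, dif_neg (by omega)]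
        obtain ⟨M, hM⟩ : ∃ M, m.toNat = M + 1 := ⟨m.toNat - 1, by omega⟩
        rw [hk, hM]
        simp [enumPy, hlen]
  | succ K IH =>
      intro k m hk hm0 hmsz acc ms hlen
      rw [pvARec]
      by_cases hm : m = 0
      · subst hm
        rw [hk]
        simp [enumPy, ← hlen]
      · have hkpos : 0 < k := by omega
        rw [if_neg hm, dif_pos hkpos]
        have hkK : k = ((K : Int) + 1) := by omega
        -- invariant of the outer take-loop, by induction on the remaining takes
        have fold :
          ∀ (ts : List Int) (acc2 : List (List (Option Int))) (ms2 : List (Option Int)),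
            (∀ t ∈ ts, 0 ≤ t ∧ t ≤ m) → ms2.length = sz.toNat →
            (ts.foldl
              (fun st take =>
                let ms := (PySem.List.pyRange (sz - m) (sz - m + take) 1).foldl
                  (fun ms d => ms.set d.toNat (some (ne - k))) st.2
                pvARec sz ne (m - take) (k - 1) (st.1, ms)) (acc2, ms2)).1
              = acc2 ++ ts.flatMap (fun t => (enumPy ne (m - t).toNat K).map
                  (fun u => ms2.take (sz.toNat - m.toNat)
                    ++ (List.replicate t.toNat (some (ne - k)) ++ u.map some)))
            ∧ (ts.foldl
              (fun st take =>
                let ms := (PySem.List.pyRange (sz - m) (sz - m + take) 1).foldl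
                  (fun ms d => ms.set d.toNat (some (ne - k))) st.2
                pvARec sz ne (m - take) (k - 1) (st.1, ms)) (acc2, ms2)).2.length = sz.toNat
            ∧ (ts.foldl
              (fun st take =>
                let ms := (PySem.List.pyRange (sz - m) (sz - m + take) 1).foldl
                  (fun ms d => ms.set d.toNat (some (ne - k))) st.2
                pvARec sz ne (m - take) (k - 1) (st.1, ms)) (acc2, ms2)).2.take (sz.toNat - m.toNat)
              = ms2.take (sz.toNat - m.toNat) := by
          intro ts
          induction ts with
          | nil => intro acc2 ms2 _ hlen2; simp [hlen2]
          | cons t ts ihts =>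
            intro acc2 ms2 hts hlen2
            obtain ⟨ht0, htm⟩ := hts t (by simp)
            obtain ⟨T, hT⟩ : ∃ T : Nat, t = (T : Int) := ⟨t.toNat, by omega⟩
            subst hT
            rw [List.foldl_cons]
            simp only []
            obtain ⟨P, hP⟩ : ∃ P : Nat, sz - m = (P : Int) := ⟨(sz - m).toNat, by omega⟩
            have hPval : P = sz.toNat - m.toNat := by omega
            have hPle : P + T ≤ ms2.length := by omega
            set v : Option Int := some (ne - k) with hv
            set W : List (Option Int)
              := ms2.take P ++ List.replicate T v ++ ms2.drop (P + T) with hW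
            have hwr : (PySem.List.pyRange (sz - m) (sz - m + (T : Int)) 1).foldl
                (fun ms d => ms.set d.toNat v) ms2 = W := by
              rw [hP, write_loop v T P ms2 hPle]
            rw [hwr]
            have hWlen : W.length = sz.toNat := by
              rw [hW, List.length_append, List.length_append, List.length_take,
                List.length_replicate, List.length_drop]
              omega
            -- the recursive call at (m - T, k - 1)
            obtain ⟨hr1, hr2, hr3⟩ := IH (k - 1) (m - T) (by omega) (by omega) (by omega) acc2 W hWlen
            have hpref : (sz.toNat - (m - (T : Int)).toNat) = P + T := by omega
            have htklen : (ms2.take P).length = P := by simp; omega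
            have hWtake : W.take (P + T) = ms2.take P ++ List.replicate T v := by
              rw [hW, List.take_left' (by rw [List.length_append, htklen, List.length_replicate])]
            have hWtakeP : W.take P = ms2.take P := by
              rw [hW, List.append_assoc, List.take_left' htklen]
            rcases hrec : pvARec sz ne (m - (T : Int)) (k - 1) (acc2, W) with ⟨racc, rms⟩
            rw [hrec] at hr1 hr2 hr3
            dsimp only at hr1 hr2 hr3
            have hk1 : (k - 1).toNat = K := by omega
            rw [hk1] at hr1
            rw [hpref] at hr1 hr3
            rw [hWtake] at hr1 hr3
            obtain ⟨hf1, hf2, hf3⟩ := ihts racc rms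
              (fun t ht => hts t (List.mem_cons_of_mem _ ht)) hr2
            have hrmsP : rms.take P = ms2.take P := by
              have h1 : rms.take P = (rms.take (P + T)).take P := by
                rw [List.take_take]
                congr 1
                omega
              rw [h1, hr3, List.take_left' htklen]
            refine ⟨?_, ?_, ?_⟩
            · rw [hf1, hr1, ← hPval, hrmsP, List.flatMap_cons, ← List.append_assoc]
              congr 1
              congr 1
              simp [List.append_assoc]
            · exact hf2
            · rw [hf3, ← hPval, hrmsP]
        obtain ⟨hg1, hg2, hg3⟩ := fold (PySem.List.pyRange 0 (m + 1) 1) acc ms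
          (fun t ht => by rw [PySem.List.mem_pyRange_one] at ht; omega) hlen
        refine ⟨?_, hg2, hg3⟩
        rw [hg1, hk]
        congr 1
        rw [PySem.List.pyRange_one, show ((m + 1 - 0).toNat) = m.toNat + 1 from by omega]
        rw [List.flatMap_map]
        rw [enumPy_unfold ne m.toNat K, List.map_flatMap]
        apply List.flatMap_congr
        intro j hj
        rw [List.mem_range] at hj
        show ((enumPy ne (m - (0 + (j : Int))).toNat K).map _) = _
        rw [show (m - (0 + (j : Int))).toNat = m.toNat - j from by omega]
        rw [List.map_map]
        apply List.map_congr_left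
        intro u _
        show List.take (sz.toNat - m.toNat) ms
            ++ (List.replicate (0 + (j : Int)).toNat (some (ne - k)) ++ List.map some u) = _
        rw [show (0 + (j : Int)).toNat = j from by omega]
        simp [hkK, List.map_append]

-- ===== VERDICT (by name: the statement is the Claim_ definition above) =====
theorem multisets_enum_rec_spec : Claim_equal_multisets_enum_rec := by
  intro sz ne _ _
  unfold Spec_multisets_enum_rec multisets_enum_rec multisets_enum_rec_alt
  by_cases hneg : sz < 0
  · rw [if_pos hneg, pvARec, if_neg (by omega)]
    by_cases hne : 0 < ne
    · rw [dif_pos hne, PySem.List.pyRange_one_eq_nil (by omega)]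
      simp
    · rw [dif_neg hne]
  · rw [if_neg hneg]
    by_cases hz : sz = 0
    · subst hz
      rw [if_pos rfl, pvARec]
      simp
    rw [if_neg hz]
    obtain ⟨h1, _, _⟩ := pvARec_spec sz ne ne.toNat ne sz rfl (by omega) le_rfl
      [] (List.replicate sz.toNat none) (by simp)
    rw [h1, enumPy_eq_reverse_cwr]
    simp
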